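-- pv_equiv track=rewrite | github.com/GillesArcas/Advent_of_Code | 2017/20.py | remove_collisions
-- ===== SOURCE A (Python) =====
-- def remove_collisions(particles):
--     positions = dict()
--     for index, particle in enumerate(particles):
--         coord = tuple(particle[:3])
--         if coord not in positions:
--             positions[coord] = [index]
--         else:
--             positions[coord].append(index)
--
--     colliding_particles = set()
--     for list_particles in positions.values():
--         if len(list_particles) > 1:
--             colliding_particles.update(list_particles)
--
--     new_particles = []
--     for index, particle in enumerate(particles):
--         if index not in colliding_particles:
--             new_particles.append(particle)
--
--     return new_particles
-- ===== SOURCE B (Python) =====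
-- def remove_collisions(particles):
--     return [p for p in particles
--             if sum(1 for q in particles if q[:3] == p[:3]) == 1]
-- ===== Notes on version B (the rewrite author's own statement) =====
-- stated objective: simpler
-- what changed: B drops A's index bookkeeping (dict of index lists plus a colliding-index set) entirely and uses a dict-free quadratic filter: keep each particle iff a direct scan of the list finds its coordinate exactly once.
import Mathlib
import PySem

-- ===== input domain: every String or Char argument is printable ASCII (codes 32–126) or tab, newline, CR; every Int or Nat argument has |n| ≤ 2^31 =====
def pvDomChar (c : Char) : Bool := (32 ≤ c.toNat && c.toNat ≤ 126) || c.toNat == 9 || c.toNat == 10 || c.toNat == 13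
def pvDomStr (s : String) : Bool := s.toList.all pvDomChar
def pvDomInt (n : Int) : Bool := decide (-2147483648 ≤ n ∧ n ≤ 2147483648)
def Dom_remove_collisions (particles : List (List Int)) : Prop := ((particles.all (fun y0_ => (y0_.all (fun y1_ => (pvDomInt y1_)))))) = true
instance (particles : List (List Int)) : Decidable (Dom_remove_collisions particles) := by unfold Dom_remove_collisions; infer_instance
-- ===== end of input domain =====

-- B drops A's index bookkeeping (dict of index lists + colliding-index set) and instead keeps a
-- particle iff a direct scan of the list finds its coordinate exactly once (simpler, dict-free).


-- ===== PORT A =====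
def remove_collisions (particles : List (List Int)) : List (List Int) :=
  -- positions: coord -> list of indices (dict built with if-absent-insert-else-append)
  let positions : PySem.Dict (List Int) (List Int) :=
    (PySem.List.enumerate particles).foldl
      (fun d ip =>
        let coord := PySem.List.slice ip.2 none (some 3)
        if d.contains coord = false then d.insert coord [ip.1]
        else d.modify coord [] (fun l => l ++ [ip.1]))
      PySem.Dict.empty
  -- colliding_particles: set of indices appearing in a value list of length > 1
  let colliding : PySem.Set Int :=
    positions.values.foldl
      (fun s lst => if 1 < lst.length then s.update lst else s)
      (PySem.Set.ofList [])
  -- third pass: keep particles whose index is not in the colliding set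
  (PySem.List.enumerate particles).foldl
    (fun acc ip => if !(colliding.contains ip.1) then acc ++ [ip.2] else acc)
    []

-- ===== PORT B =====
-- keep p iff sum(1 for q in particles if q[:3] == p[:3]) == 1 (the inner sum is a fold)
def remove_collisions_alt (particles : List (List Int)) : List (List Int) :=
  particles.filter (fun p =>
    (particles.foldl
      (fun n q =>
        if PySem.List.slice q none (some 3) == PySem.List.slice p none (some 3)
        then n + 1 else n)
      (0 : Int)) == 1)

-- ===== PRECONDITION & SPEC =====
def Spec_remove_collisions (particles : List (List Int)) (out : List (List Int)) : Prop := out = remove_collisions_alt particles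
instance (particles : List (List Int)) (out : List (List Int)) : Decidable (Spec_remove_collisions particles out) := by unfold Spec_remove_collisions; infer_instance

-- ===== CLAIM (what is proved, stated in full; the proofs are below) =====
def Claim_equal_remove_collisions : Prop := ∀ (particles : List (List Int)), Dom_remove_collisions particles → Spec_remove_collisions particles (remove_collisions particles)

-- ===== LEMMAS AND PROOFS =====

-- coordinate key: particle[:3]
abbrev pvKey (p : List Int) : List Int := PySem.List.slice p none (some 3)

-- A's if-absent-insert-else-append step is the modify step
lemma pvStepA (d : PySem.Dict (List Int) (List Int)) (c : List Int) (x : Int) :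
    (if d.contains c = false then d.insert c [x] else d.modify c [] (fun l => l ++ [x]))
      = d.modify c [] (fun l => l ++ [x]) := by
  by_cases h : d.contains c = false
  · simp only [h, if_true]
    have hm : d.modify c [] (fun l => l ++ [x]) = d.insert c ((d.getD c []) ++ [x]) :=
      PySem.Dict.ext_iff.mpr rfl
    rw [hm, PySem.Dict.getD_of_not_contains d [] h]
    rfl
  · simp [h]

-- membership in the colliding-set fold
lemma pvMemCollect (vs : List (List Int)) (s0 : PySem.Set Int) (x : Int) :
    x ∈ vs.foldl (fun s lst => if 1 < lst.length then s.update lst else s) s0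
      ↔ x ∈ s0 ∨ ∃ l ∈ vs, 1 < l.length ∧ x ∈ l := by
  induction vs generalizing s0 with
  | nil => simp
  | cons v vs ih =>
    rw [List.foldl_cons]
    by_cases h : 1 < v.length
    · simp only [h, if_true, ih, PySem.Set.mem_update, List.mem_cons]
      constructor
      · rintro ((hs|hv)|⟨l,hl,hc,hx⟩)
        · exact Or.inl hs
        · exact Or.inr ⟨v, Or.inl rfl, h, hv⟩
        · exact Or.inr ⟨l, Or.inr hl, hc, hx⟩
      · rintro (hs|⟨l,(rfl|hl),hc,hx⟩)
        · exact Or.inl (Or.inl hs)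
        · exact Or.inl (Or.inr hx)
        · exact Or.inr ⟨l, hl, hc, hx⟩
    · simp only [h, if_false, ih, List.mem_cons]
      constructor
      · rintro (hs|⟨l,hl,hc,hx⟩)
        · exact Or.inl hs
        · exact Or.inr ⟨l, Or.inr hl, hc, hx⟩
      · rintro (hs|⟨l,(rfl|hl),hc,hx⟩)
        · exact Or.inl hs
        · exact absurd hc h
        · exact Or.inr ⟨l, hl, hc, hx⟩

-- proof-side names for A's intermediate structures (defeq to the lets in the port)
def pvPositions (particles : List (List Int)) : PySem.Dict (List Int) (List Int) :=
  (PySem.List.enumerate particles).foldl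
    (fun d ip => d.modify (pvKey ip.2) [] (fun l => l ++ [ip.1])) PySem.Dict.empty

def pvColliding (particles : List (List Int)) : PySem.Set Int :=
  (pvPositions particles).values.foldl
    (fun s lst => if 1 < lst.length then s.update lst else s) (PySem.Set.ofList [])

lemma pvGetD (particles : List (List Int)) (c : List Int) :
    (pvPositions particles).getD c []
      = (((PySem.List.enumerate particles).map (fun ip => (pvKey ip.2, ip.1))).filter
          (fun q => q.1 == c)).map (fun q => q.2) := by
  unfold pvPositions
  rw [show (PySem.List.enumerate particles).foldl
        (fun d ip => d.modify (pvKey ip.2) [] (fun l => l ++ [ip.1])) PySem.Dict.empty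
      = ((PySem.List.enumerate particles).map (fun ip => (pvKey ip.2, ip.1))).foldl
        (fun d q => d.modify q.1 [] (fun l => l ++ [q.2])) PySem.Dict.empty from
    (List.foldl_map (f := fun ip => (pvKey ip.2, ip.1))
      (g := fun d q => d.modify q.1 [] (fun l => l ++ [q.2]))
      (l := PySem.List.enumerate particles) (init := PySem.Dict.empty)).symm]
  rw [PySem.Dict.getD_foldl_modify_append]
  rfl

lemma pvKeysMem (particles : List (List Int)) (c : List Int) :
    c ∈ (pvPositions particles).keys ↔ c ∈ particles.map pvKey := by
  unfold pvPositions
  rw [PySem.Dict.keys_foldl_modify_key (PySem.List.enumerate particles)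
        (fun ip => pvKey ip.2) [] (fun _ ip => fun l => l ++ [ip.1]) PySem.Dict.empty]
  rw [PySem.Set.mem_update]
  have h2 : (PySem.List.enumerate particles).map (fun ip => pvKey ip.2) = particles.map pvKey := by
    conv_rhs => rw [← PySem.List.map_snd_enumerate particles 0, List.map_map]
    rfl
  rw [h2]
  simp [PySem.Dict.empty, PySem.Dict.keys]

lemma pvNodupKeys (particles : List (List Int)) : (pvPositions particles).keys.Nodup := by
  unfold pvPositions
  exact PySem.Dict.nodup_keys_foldl_modify_key _ _ _ _ _ (by simp [PySem.Dict.empty, PySem.Dict.keys])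

lemma pvLenGetD (particles : List (List Int)) (c : List Int) :
    ((pvPositions particles).getD c []).length = (particles.map pvKey).count c := by
  rw [pvGetD, List.length_map, ← List.countP_eq_length_filter, List.countP_map]
  conv_rhs => rw [← PySem.List.map_snd_enumerate particles 0, List.map_map,
    List.count_eq_countP, List.countP_map]
  rfl

lemma pvMemGetD (particles : List (List Int)) (c : List Int) (x : Int) :
    x ∈ (pvPositions particles).getD c []
      ↔ ∃ k, ∃ _ : k < particles.length, pvKey particles[k] = c ∧ x = (k : Int) := by
  rw [pvGetD]
  simp only [List.mem_map, List.mem_filter, PySem.List.mem_enumerate_iff]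
  constructor
  · rintro ⟨q, ⟨⟨ip, ⟨⟨k, hk, rfl⟩, rfl⟩⟩, hc⟩, rfl⟩
    exact ⟨k, hk, by simpa using hc, by simp⟩
  · rintro ⟨k, hk, hc, rfl⟩
    exact ⟨(pvKey particles[k], (k : Int)), ⟨⟨(0 + (k:Int), particles[k]), ⟨k, hk, rfl⟩,
      by simp⟩, by simpa using hc⟩, by simp⟩

lemma pvCollidingIff (particles : List (List Int)) (k : Nat) (hk : k < particles.length) :
    ((k : Int) ∈ pvColliding particles) ↔ 1 < (particles.map pvKey).count (pvKey particles[k]) := by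
  unfold pvColliding
  rw [pvMemCollect]
  rw [PySem.Dict.values_eq_map_keys _ (pvNodupKeys particles) []]
  simp only [PySem.Set.mem_ofList, List.not_mem_nil, false_or, List.mem_map]
  constructor
  · rintro ⟨l, ⟨c, hc, rfl⟩, hlen, hmem⟩
    rcases (pvMemGetD particles c _).mp hmem with ⟨k', hk', hkey, hkk⟩
    have hke : k = k' := by exact_mod_cast hkk
    subst hke
    rw [pvLenGetD] at hlen
    rwa [hkey]
  · intro h
    refine ⟨(pvPositions particles).getD (pvKey particles[k]) [],
      ⟨pvKey particles[k], ?_, rfl⟩, ?_, ?_⟩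
    · exact (pvKeysMem particles _).mpr (List.mem_map_of_mem (List.getElem_mem hk))
    · rwa [pvLenGetD]
    · exact (pvMemGetD particles _ _).mpr ⟨k, hk, rfl, rfl⟩

lemma pvAEq (particles : List (List Int)) :
    remove_collisions particles
      = particles.filter (fun p => (particles.map pvKey).count (pvKey p) == 1) := by
  unfold remove_collisions
  simp only [pvStepA]
  show (PySem.List.enumerate particles).foldl
      (fun acc ip => if !((pvColliding particles).contains ip.1) then acc ++ [ip.2] else acc) []
    = _
  rw [PySem.List.foldl_append_if (fun ip => !((pvColliding particles).contains ip.1))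
        (fun ip => ip.2) (PySem.List.enumerate particles) []]
  rw [List.nil_append]
  rw [List.filter_congr (q := fun ip => (particles.map pvKey).count (pvKey ip.2) == 1) ?_]
  · have hswap : ∀ (cs : List (List Int)),
        ((PySem.List.enumerate particles).filter
            (fun ip => cs.count (pvKey ip.2) == 1)).map (fun ip => ip.2)
          = particles.filter (fun p => cs.count (pvKey p) == 1) := by
      intro cs
      conv_rhs => rw [← PySem.List.map_snd_enumerate particles 0]
      rw [List.filter_map]
      rfl
    exact hswap _
  · rintro ip hip
    rcases (PySem.List.mem_enumerate_iff particles 0 ip).mp hip with ⟨k, hk, rfl⟩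
    have hmem : pvKey particles[k] ∈ particles.map pvKey :=
      List.mem_map_of_mem (List.getElem_mem hk)
    have hpos : 0 < (particles.map pvKey).count (pvKey particles[k]) :=
      List.count_pos_iff.mpr hmem
    have hiff : ((pvColliding particles).contains ((k : Int)) = true)
        ↔ 1 < (particles.map pvKey).count (pvKey particles[k]) := by
      rw [PySem.Set.contains_iff]
      exact pvCollidingIff particles k hk
    simp only [zero_add]
    cases hb : (pvColliding particles).contains ((k : Int)) with
    | false =>
      have hnot : ¬ 1 < (particles.map pvKey).count (pvKey particles[k]) := by
        intro hlt
        have h2 := hiff.mpr hlt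
        rw [hb] at h2
        exact Bool.false_ne_true h2
      have h1 : (particles.map pvKey).count (pvKey particles[k]) = 1 := by omega
      simp [h1]
    | true =>
      have hlt := hiff.mp hb
      have h1 : (particles.map pvKey).count (pvKey particles[k]) ≠ 1 := by omega
      simp [h1]

-- B's inner counting fold equals the Nat count, cast to Int
lemma pvFoldCount (pred : List Int → Bool) (l : List (List Int)) (n : Int) :
    l.foldl (fun n q => if pred q then n + 1 else n) n = n + (l.countP pred : Int) := by
  induction l generalizing n with
  | nil => simp
  | cons q l ih =>
    rw [List.foldl_cons, ih, List.countP_cons]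
    by_cases h : pred q = true
    · simp [h]; ring
    · simp [h]

lemma pvAltEq (particles : List (List Int)) :
    remove_collisions_alt particles
      = particles.filter (fun p => (particles.map pvKey).count (pvKey p) == 1) := by
  unfold remove_collisions_alt
  apply List.filter_congr
  intro p _
  rw [pvFoldCount]
  rw [Bool.eq_iff_iff]
  simp only [beq_iff_eq, zero_add]
  have hc : (particles.map pvKey).count (pvKey p)
      = particles.countP (fun q => PySem.List.slice q none (some 3) == pvKey p) := by
    rw [List.count_eq_countP, List.countP_map]
    rfl
  rw [hc]
  constructor
  · intro h; exact_mod_cast h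
  · intro h; exact_mod_cast h

-- ===== VERDICT (by name: the statement is the Claim_ definition above) =====
theorem remove_collisions_spec : Claim_equal_remove_collisions := by
  intro particles _
  unfold Spec_remove_collisions
  rw [pvAEq, pvAltEq]
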